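-- pv_equiv track=rewrite | github.com/Jinkyun0328/CodingTestPython | Emoticons_Sales/Emoticons_Sales_Product.py | solution
-- ===== SOURCE A (Python) =====
-- from itertools import product
--
-- def solution(users, emoticons):
--     answer = []
--
--     SaleRate = [10, 20, 30, 40]
--
--     pros = list(product(SaleRate, repeat=len(emoticons)))
--
--     max_sale = [0, 0]
--
--     for pro in pros:
--         sales = [0, 0]
--
--         for user in users:
--             purchase = 0
--
--             for i in range (len(pro)):
--                 if user[0] <= pro[i]:
--                     purchase += ((100-pro[i])*(emoticons[i]//100))
--
--                 if purchase >= user[1]: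
--                     sales[0] += 1
--                     break
--             else:
--                 sales[1] += purchase
--
--         if sales[0] > max_sale[0]:
--             max_sale = sales
--         elif sales[0] == max_sale[0] and sales[1] > max_sale[1]:
--             max_sale = sales
--
--     answer = max_sale
--     return answer
-- ===== SOURCE B (Python) =====
-- def solution(users, emoticons):
--     # Depth-first search over discount choices, one emoticon at a time, carrying each
--     # still-undecided user's running purchase; a user who reaches their subscription
--     # threshold is dropped from the active set, so the whole subtree shares that work.
--     n = len(emoticons)
--     best = (0, 0)
--
--     def dfs(i, subs, active):
--         nonlocal best
--         if i == n:
--             sale = (subs, sum(p for _, p in active))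
--             if sale > best:
--                 best = sale
--             return
--         for rate in (10, 20, 30, 40):
--             ns = subs
--             na = []
--             for u, p in active:
--                 if u[0] <= rate:
--                     p += (100 - rate) * (emoticons[i] // 100)
--                 if p >= u[1]:
--                     ns += 1
--                 else:
--                     na.append((u, p))
--             dfs(i + 1, ns, na)
--
--     dfs(0, 0, [(u, 0) for u in users])
--     return list(best)
-- ===== Notes on version B (the rewrite author's own statement) =====
-- stated objective: alternative
-- what changed: B replaces A's flat enumeration of all 4^n discount tuples (itertools.product) with a depth-first search over one emoticon at a time that carries each undecided user's running purchase and permanently drops users once they subscribe, so prefix work is shared across all combinations and finished users are never rescanned; the best (subscriptions, revenue) pair is kept by a single lexicographic tuple comparison. Pre_ excludes only the inputs where both programs raise IndexError: a user record with fewer than two entries while emoticons is nonempty.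
import Mathlib
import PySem

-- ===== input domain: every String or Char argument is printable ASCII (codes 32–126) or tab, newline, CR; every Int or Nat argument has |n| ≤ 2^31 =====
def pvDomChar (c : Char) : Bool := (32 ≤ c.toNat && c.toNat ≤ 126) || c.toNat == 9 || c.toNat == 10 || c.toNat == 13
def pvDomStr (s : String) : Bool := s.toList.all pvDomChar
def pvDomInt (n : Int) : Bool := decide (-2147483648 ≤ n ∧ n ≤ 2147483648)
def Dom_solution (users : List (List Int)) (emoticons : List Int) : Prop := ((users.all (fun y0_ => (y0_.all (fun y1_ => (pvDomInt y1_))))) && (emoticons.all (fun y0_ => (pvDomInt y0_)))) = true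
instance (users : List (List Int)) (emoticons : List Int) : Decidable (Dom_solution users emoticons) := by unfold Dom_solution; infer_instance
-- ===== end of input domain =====

-- B replaces A's flat enumeration of all 4^n discount tuples by a depth-first search
-- over one emoticon at a time that carries each undecided user's running purchase and
-- drops subscribed users, sharing the prefix work across all combinations (alternative).

-- ===== PORT A =====
-- list(product([10,20,30,40], repeat=n)): first coordinate varies slowest
def pyProsA : Nat → List (List Int)
  | 0 => [[]]
  | n + 1 => ([10, 20, 30, 40] : List Int).flatMap (fun r => (pyProsA n).map (fun p => r :: p))

-- the 'for i in range(len(pro))' loop with break/else: none = break (subscriber),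
-- some p = loop fell through with accumulated purchase p
def userLoopA (u0 u1 : Int) (pairs : List (Int × Int)) (purchase : Int) : Option Int :=
  match pairs with
  | [] => some purchase
  | (r, e) :: rest =>
    let p := if u0 ≤ r then purchase + (100 - r) * PySem.Int.floordiv e 100 else purchase
    if u1 ≤ p then none else userLoopA u0 u1 rest p

def salesA (users : List (List Int)) (pairs : List (Int × Int)) : Int × Int :=
  users.foldl (fun s u =>
    match userLoopA (PySem.List.pyGetD u 0 0) (PySem.List.pyGetD u 1 0) pairs 0 with
    | none => (s.1 + 1, s.2)
    | some p => (s.1, s.2 + p)) (0, 0)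

def solution (users : List (List Int)) (emoticons : List Int) : List Int :=
  let ms := (pyProsA emoticons.length).foldl (fun ms pro =>
    let sales := salesA users (pro.zip emoticons)
    if ms.1 < sales.1 then sales
    else if sales.1 = ms.1 ∧ ms.2 < sales.2 then sales
    else ms) (0, 0)
  [ms.1, ms.2]

-- ===== PORT B =====
-- the inner 'for u, p in active' loop of dfs for one rate choice
def stepB (r e : Int) (sa : Int × List (List Int × Int)) (up : List Int × Int) : Int × List (List Int × Int) :=
  let p := if PySem.List.pyGetD up.1 0 0 ≤ r then up.2 + (100 - r) * PySem.Int.floordiv e 100 else up.2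
  if PySem.List.pyGetD up.1 1 0 ≤ p then (sa.1 + 1, sa.2) else (sa.1, sa.2 ++ [(up.1, p)])

-- dfs(i, subs, active) with the nonlocal 'best' threaded through as an accumulator
def dfsB (ems : List Int) (subs : Int) (active : List (List Int × Int)) (best : Int × Int) : Int × Int :=
  match ems with
  | [] =>
    let sale : Int × Int := (subs, (active.map (fun up => up.2)).sum)
    if best.1 < sale.1 ∨ (best.1 = sale.1 ∧ best.2 < sale.2) then sale else best
  | e :: rest =>
    ([10, 20, 30, 40] : List Int).foldl (fun best r =>
      let sn := active.foldl (stepB r e) (subs, [])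
      dfsB rest sn.1 sn.2 best) best

def solution_alt (users : List (List Int)) (emoticons : List Int) : List Int :=
  let b := dfsB emoticons 0 (users.map (fun u => (u, 0))) (0, 0)
  [b.1, b.2]

-- ===== PRECONDITION & SPEC =====
-- Pre_ excludes exactly the inputs where Python A (and B) raises IndexError: a user
-- record with fewer than two entries is indexed (user[0]/user[1]) whenever emoticons
-- is nonempty.
def Pre_solution (users : List (List Int)) (emoticons : List Int) : Prop :=
  emoticons = [] ∨ ∀ u ∈ users, 2 ≤ u.length
instance (users : List (List Int)) (emoticons : List Int) : Decidable (Pre_solution users emoticons) := by unfold Pre_solution; infer_instance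

def pvWitness_solution : List (List Int) × List Int := ([[40, 100], [25, 1000]], [7000, 9000])

def Spec_solution (users : List (List Int)) (emoticons : List Int) (out : List Int) : Prop := out = solution_alt users emoticons
instance (users : List (List Int)) (emoticons : List Int) (out : List Int) : Decidable (Spec_solution users emoticons out) := by unfold Spec_solution; infer_instance

-- ===== CLAIM (what is proved, stated in full; the proofs are below) =====
def Claim_equal_solution : Prop := ∀ (users : List (List Int)) (emoticons : List Int), Dom_solution users emoticons → Pre_solution users emoticons → Spec_solution users emoticons (solution users emoticons)

-- ===== LEMMAS AND PROOFS =====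

-- proof-only helpers: the per-combination user fold of A, started from an arbitrary
-- accumulator and over an arbitrary mid-search active set
def salesGo (s : Int × Int) (active : List (List Int × Int)) (pairs : List (Int × Int)) : Int × Int :=
  active.foldl (fun s up =>
    match userLoopA (PySem.List.pyGetD up.1 0 0) (PySem.List.pyGetD up.1 1 0) pairs up.2 with
    | none => (s.1 + 1, s.2)
    | some q => (s.1, s.2 + q)) s

def contribSum (pairs : List (Int × Int)) : List (List Int × Int) → Int × Int
  | [] => (0, 0)
  | up :: tl =>
    let c : Int × Int :=
      match userLoopA (PySem.List.pyGetD up.1 0 0) (PySem.List.pyGetD up.1 1 0) pairs up.2 with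
      | none => (1, 0)
      | some q => (0, q)
    let t := contribSum pairs tl
    (c.1 + t.1, c.2 + t.2)

def stepRec (r e : Int) : List (List Int × Int) → Int × List (List Int × Int)
  | [] => (0, [])
  | up :: tl =>
    let p := if PySem.List.pyGetD up.1 0 0 ≤ r then up.2 + (100 - r) * PySem.Int.floordiv e 100 else up.2
    let t := stepRec r e tl
    if PySem.List.pyGetD up.1 1 0 ≤ p then (t.1 + 1, t.2) else (t.1, (up.1, p) :: t.2)

lemma salesGo_eq (pairs : List (Int × Int)) (active : List (List Int × Int)) (s : Int × Int) :
    salesGo s active pairs = (s.1 + (contribSum pairs active).1, s.2 + (contribSum pairs active).2) := by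
  induction active generalizing s with
  | nil => simp [salesGo, contribSum]
  | cons up tl ih =>
    simp only [salesGo, List.foldl, contribSum] at *
    rcases h : userLoopA (PySem.List.pyGetD up.1 0 0) (PySem.List.pyGetD up.1 1 0) pairs up.2 with _ | q
    · rw [ih]; simp only [h, Prod.ext_iff]; constructor <;> dsimp only <;> ring
    · rw [ih]; simp only [h, Prod.ext_iff]; constructor <;> dsimp only <;> ring

lemma foldl_stepB (r e : Int) (active : List (List Int × Int)) (s : Int) (acc : List (List Int × Int)) :
    active.foldl (stepB r e) (s, acc) = (s + (stepRec r e active).1, acc ++ (stepRec r e active).2) := by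
  induction active generalizing s acc with
  | nil => simp [stepRec]
  | cons up tl ih =>
    simp only [List.foldl, stepB, stepRec]
    by_cases h : PySem.List.pyGetD up.1 1 0 ≤
        (if PySem.List.pyGetD up.1 0 0 ≤ r then up.2 + (100 - r) * PySem.Int.floordiv e 100 else up.2)
    · simp only [h, if_true, ih]
      have hs : s + 1 + (stepRec r e tl).1 = s + ((stepRec r e tl).1 + 1) := by ring
      rw [hs]
    · simp only [h, if_false, ih, List.append_assoc, List.singleton_append]

lemma contribSum_step (r e : Int) (pairs : List (Int × Int)) (active : List (List Int × Int)) :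
    contribSum ((r, e) :: pairs) active =
      ((stepRec r e active).1 + (contribSum pairs (stepRec r e active).2).1,
       (contribSum pairs (stepRec r e active).2).2) := by
  induction active with
  | nil => simp [contribSum, stepRec]
  | cons up tl ih =>
    simp only [contribSum, stepRec, userLoopA]
    by_cases h : PySem.List.pyGetD up.1 1 0 ≤
        (if PySem.List.pyGetD up.1 0 0 ≤ r then up.2 + (100 - r) * PySem.Int.floordiv e 100 else up.2)
    · simp only [h, if_true, ih, Prod.ext_iff]
      constructor <;> dsimp only <;> ring
    · simp only [h, if_false, ih]
      rcases hq : userLoopA (PySem.List.pyGetD up.1 0 0) (PySem.List.pyGetD up.1 1 0) pairs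
          (if PySem.List.pyGetD up.1 0 0 ≤ r then up.2 + (100 - r) * PySem.Int.floordiv e 100 else up.2)
          with _ | q
      · simp only [contribSum, hq, Prod.ext_iff]
        constructor <;> dsimp only <;> ring
      · simp only [contribSum, hq, Prod.ext_iff]
        constructor <;> dsimp only <;> ring

lemma contribSum_nil (active : List (List Int × Int)) :
    contribSum [] active = (0, (active.map (fun up => up.2)).sum) := by
  induction active with
  | nil => simp [contribSum]
  | cons up tl ih => simp [contribSum, userLoopA, ih]

lemma sales_step (r e : Int) (pairs : List (Int × Int)) (active : List (List Int × Int)) (subs : Int) :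
    salesGo (subs, 0) active ((r, e) :: pairs) =
      salesGo (subs + (stepRec r e active).1, 0) (stepRec r e active).2 pairs := by
  rw [salesGo_eq, salesGo_eq, contribSum_step]
  simp only [Prod.ext_iff]
  constructor <;> dsimp only <;> ring

lemma foldl_flatMap' {α β γ : Type} (f : γ → β → γ) (b : γ) (l : List α) (g : α → List β) :
    (l.flatMap g).foldl f b = l.foldl (fun b a => (g a).foldl f b) b := by
  induction l generalizing b with
  | nil => rfl
  | cons a t ih => simp [List.flatMap_cons, List.foldl_append, ih]

lemma dfs_eq (ems : List Int) (subs : Int) (active : List (List Int × Int)) (best : Int × Int) :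
    dfsB ems subs active best =
      (pyProsA ems.length).foldl (fun b pro =>
        let sale := salesGo (subs, 0) active (pro.zip ems)
        if b.1 < sale.1 ∨ (b.1 = sale.1 ∧ b.2 < sale.2) then sale else b) best := by
  induction ems generalizing subs active best with
  | nil =>
    simp only [dfsB, List.length_nil, pyProsA, List.foldl, List.zip_nil_left]
    rw [salesGo_eq, contribSum_nil]
    simp
  | cons e rest ih =>
    simp only [dfsB, List.length_cons, pyProsA, foldl_flatMap', List.foldl_map]
    apply PySem.List.foldl_congr_mem
    intro b r _
    dsimp only
    rw [foldl_stepB, ih]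
    simp only [List.nil_append]
    apply PySem.List.foldl_congr_mem
    intro b' pro _
    dsimp only
    rw [List.zip_cons_cons, sales_step]

lemma salesGo_root (users : List (List Int)) (pairs : List (Int × Int)) :
    salesGo (0, 0) (users.map (fun u => (u, 0))) pairs = salesA users pairs := by
  simp only [salesGo, salesA, List.foldl_map]

lemma update_eq (ms sr : Int × Int) :
    (if ms.1 < sr.1 ∨ (ms.1 = sr.1 ∧ ms.2 < sr.2) then sr else ms) =
      (if ms.1 < sr.1 then sr else if sr.1 = ms.1 ∧ ms.2 < sr.2 then sr else ms) := by
  by_cases h1 : ms.1 < sr.1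
  · rw [if_pos (Or.inl h1), if_pos h1]
  · by_cases h2 : sr.1 = ms.1 ∧ ms.2 < sr.2
    · rw [if_pos (Or.inr ⟨h2.1.symm, h2.2⟩), if_neg h1, if_pos h2]
    · rw [if_neg ?_, if_neg h1, if_neg h2]
      rintro (h | h)
      · exact h1 h
      · exact h2 ⟨h.1.symm, h.2⟩

-- ===== VERDICT (by name: the statement is the Claim_ definition above) =====
theorem solution_spec : Claim_equal_solution := by
  intro users emoticons _ _
  unfold Spec_solution solution solution_alt
  dsimp only
  rw [dfs_eq]
  refine congrArg (fun p : Int × Int => [p.1, p.2]) ?_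
  apply PySem.List.foldl_congr_mem
  intro b pro _
  dsimp only
  rw [salesGo_root, update_eq]
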